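-- pv_equiv track=rewrite | github.com/rlabarca/purlin | tools/cdd/serve.py | _collapsed_isolation_label
-- ===== SOURCE A (Python) =====
-- def _collapsed_isolation_label(worktrees):
--     """Compute collapsed sub-heading label and severity badge for Isolated Teams.
--
--     Returns (badge_css, heading_text, badge_text) tuple.
--     - badge_css: severity CSS class for the badge only (not the heading)
--     - heading_text: text shown in the heading when collapsed (always --purlin-muted)
--     - badge_text: worst severity state name shown in the badge to the right
--     """
--     if not worktrees:
--         return ("", "ISOLATED TEAMS", "")
--     n = len(worktrees)
--     severity_order = {"DIVERGED": 3, "BEHIND": 2, "AHEAD": 1, "SAME": 0}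
--     severity_names = {3: "DIVERGED", 2: "BEHIND", 1: "AHEAD", 0: "SAME"}
--     max_sev = 0
--     for wt in worktrees:
--         md = wt.get("main_diff", "SAME")
--         max_sev = max(max_sev, severity_order.get(md, 0))
--     if max_sev >= 3:
--         css = "st-disputed"  # orange
--     elif max_sev >= 1:
--         css = "st-todo"  # yellow
--     else:
--         css = "st-good"  # green
--     sev_name = severity_names.get(max_sev, "SAME")
--     return (css, f"{n} Isolated Team{'s' if n != 1 else ''}", sev_name)
-- ===== SOURCE B (Python) =====
-- def _collapsed_isolation_label(worktrees):
--     """Collapsed severity badge label for Isolated Teams.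
--
--     Same result as the original, but computed by collecting the distinct
--     main_diff values into a set in one pass, then scanning the fixed
--     priority list for the first value present (no per-element numeric
--     severity bookkeeping)."""
--     if not worktrees:
--         return ("", "ISOLATED TEAMS", "")
--     n = len(worktrees)
--     seen = {wt.get("main_diff", "SAME") for wt in worktrees}
--     name = "SAME"
--     for candidate in ("DIVERGED", "BEHIND", "AHEAD"):
--         if candidate in seen:
--             name = candidate
--             break
--     css = {"DIVERGED": "st-disputed", "BEHIND": "st-todo", "AHEAD": "st-todo"}.get(name, "st-good")
--     return (css, f"{n} Isolated Team{'s' if n != 1 else ''}", name)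
-- ===== Notes on version B (the rewrite author's own statement) =====
-- stated objective: idiomatic
-- what changed: Replaces the per-worktree numeric severity max-fold plus two reverse lookup dicts with a one-pass set of distinct main_diff values scanned against the fixed priority list DIVERGED>BEHIND>AHEAD, picking the first name present (SAME otherwise) and mapping it directly to its css class.
import Mathlib
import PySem

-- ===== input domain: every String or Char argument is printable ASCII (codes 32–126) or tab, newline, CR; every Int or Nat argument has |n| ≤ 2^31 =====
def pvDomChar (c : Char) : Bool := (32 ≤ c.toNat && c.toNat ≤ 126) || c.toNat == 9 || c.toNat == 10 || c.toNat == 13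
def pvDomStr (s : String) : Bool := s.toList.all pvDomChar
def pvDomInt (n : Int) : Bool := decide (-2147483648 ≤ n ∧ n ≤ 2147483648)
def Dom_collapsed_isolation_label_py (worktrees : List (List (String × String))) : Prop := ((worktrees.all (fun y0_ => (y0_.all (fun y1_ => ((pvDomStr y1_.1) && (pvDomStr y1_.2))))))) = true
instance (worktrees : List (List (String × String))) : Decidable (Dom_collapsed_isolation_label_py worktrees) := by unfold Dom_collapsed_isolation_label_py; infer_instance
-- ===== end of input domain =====

-- B replaces the numeric severity max-fold and reverse-lookup dicts with a set of
-- distinct main_diff values scanned against the fixed priority list (idiomatic; same cost).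


-- ===== PORT A =====
def collapsed_isolation_label_py (worktrees : List (List (String × String))) : String × String × String :=
  if worktrees = [] then ("", "ISOLATED TEAMS", "")
  else
    let n : Int := worktrees.length
    let severity_order : PySem.Dict String Int :=
      PySem.Dict.mk [("DIVERGED", 3), ("BEHIND", 2), ("AHEAD", 1), ("SAME", 0)]
    let severity_names : PySem.Dict Int String :=
      PySem.Dict.mk [(3, "DIVERGED"), (2, "BEHIND"), (1, "AHEAD"), (0, "SAME")]
    let max_sev : Int := worktrees.foldl
      (fun acc wt =>
        let md := PySem.Dict.getD (PySem.Dict.mk wt) "main_diff" "SAME"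
        max acc (severity_order.getD md 0)) 0
    let css : String :=
      if max_sev ≥ 3 then "st-disputed" else if max_sev ≥ 1 then "st-todo" else "st-good"
    let sev_name := severity_names.getD max_sev "SAME"
    (css, PySem.Int.toStr n ++ " Isolated Team" ++ (if n ≠ 1 then "s" else ""), sev_name)

-- ===== PORT B =====
def collapsed_isolation_label_py_alt (worktrees : List (List (String × String))) : String × String × String :=
  if worktrees = [] then ("", "ISOLATED TEAMS", "")
  else
    let n : Int := worktrees.length
    let seen : PySem.Set String :=
      PySem.Set.ofList (worktrees.map (fun wt => PySem.Dict.getD (PySem.Dict.mk wt) "main_diff" "SAME"))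
    -- for-loop with break over the fixed priority tuple = first candidate present, else "SAME"
    let name : String :=
      ((["DIVERGED", "BEHIND", "AHEAD"].find? (fun c => PySem.Set.contains seen c)).getD "SAME")
    let css : String :=
      (PySem.Dict.mk [("DIVERGED", "st-disputed"), ("BEHIND", "st-todo"), ("AHEAD", "st-todo")]).getD name "st-good"
    (css, PySem.Int.toStr n ++ " Isolated Team" ++ (if n ≠ 1 then "s" else ""), name)

-- ===== PRECONDITION & SPEC =====
def Spec_collapsed_isolation_label_py (worktrees : List (List (String × String))) (out : String × String × String) : Prop := out = collapsed_isolation_label_py_alt worktrees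
instance (worktrees : List (List (String × String))) (out : String × String × String) : Decidable (Spec_collapsed_isolation_label_py worktrees out) := by unfold Spec_collapsed_isolation_label_py; infer_instance

-- ===== CLAIM (what is proved, stated in full; the proofs are below) =====
def Claim_equal_collapsed_isolation_label_py : Prop := ∀ (worktrees : List (List (String × String))), Dom_collapsed_isolation_label_py worktrees → Spec_collapsed_isolation_label_py worktrees (collapsed_isolation_label_py worktrees)

-- ===== LEMMAS AND PROOFS =====

-- severity number of a main_diff string (proof-side abbreviation of A's order lookup)
def sevN (s : String) : Int :=
  if s = "DIVERGED" then 3 else if s = "BEHIND" then 2 else if s = "AHEAD" then 1 else 0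

lemma order_getD (s : String) :
    (PySem.Dict.mk [("DIVERGED", 3), ("BEHIND", 2), ("AHEAD", 1), ("SAME", 0)] : PySem.Dict String Int).getD s 0 = sevN s := by
  by_cases h1 : s = "DIVERGED"
  · subst h1; decide
  by_cases h2 : s = "BEHIND"
  · subst h2; decide
  by_cases h3 : s = "AHEAD"
  · subst h3; decide
  by_cases h4 : s = "SAME"
  · subst h4; decide
  simp [PySem.Dict.getD, PySem.Dict.get?, sevN, h1, h2, h3,
    Ne.symm h1, Ne.symm h2, Ne.symm h3, Ne.symm h4]

-- B's picked name for a list of main_diff strings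
def pickN (l : List String) : String :=
  if "DIVERGED" ∈ l then "DIVERGED"
  else if "BEHIND" ∈ l then "BEHIND"
  else if "AHEAD" ∈ l then "AHEAD" else "SAME"

lemma sevN_pick_cons (s : String) (l : List String) :
    max (sevN s) (sevN (pickN l)) = sevN (pickN (s :: l)) := by
  by_cases h1 : s = "DIVERGED" <;> by_cases h2 : s = "BEHIND" <;> by_cases h3 : s = "AHEAD" <;>
    by_cases m1 : "DIVERGED" ∈ l <;> by_cases m2 : "BEHIND" ∈ l <;> by_cases m3 : "AHEAD" ∈ l <;>
    simp_all [pickN, sevN, Ne.symm, eq_comm]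

lemma foldl_max_sevN (l : List String) (a : Int) (ha : 0 ≤ a) :
    l.foldl (fun acc s => max acc (sevN s)) a = max a (sevN (pickN l)) := by
  induction l generalizing a with
  | nil => simp only [List.foldl_nil, pickN, sevN]; simpa using (max_eq_left ha).symm
  | cons s t ih =>
    simp only [List.foldl_cons]
    rw [ih _ (le_trans ha (le_max_left a (sevN s))), max_assoc, sevN_pick_cons]

lemma find?_eq_pickN (l : List String) :
    ((["DIVERGED", "BEHIND", "AHEAD"].find? (fun c => PySem.Set.contains (PySem.Set.ofList l) c)).getD "SAME") = pickN l := by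
  by_cases m1 : "DIVERGED" ∈ l <;> by_cases m2 : "BEHIND" ∈ l <;> by_cases m3 : "AHEAD" ∈ l <;>
    simp_all [pickN, List.find?, PySem.Set.contains_eq_listContains, List.contains_eq_mem, PySem.Set.mem_ofList]

-- ===== VERDICT (by name: the statement is the Claim_ definition above) =====
theorem collapsed_isolation_label_py_spec : Claim_equal_collapsed_isolation_label_py := by
  intro ws _
  unfold Spec_collapsed_isolation_label_py collapsed_isolation_label_py collapsed_isolation_label_py_alt
  by_cases hw : ws = []
  · simp [hw]
  · rw [if_neg hw, if_neg hw]
    simp only [order_getD]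
    rw [← List.foldl_map (f := fun wt => PySem.Dict.getD (PySem.Dict.mk wt) "main_diff" "SAME")
        (g := fun (acc : Int) s => max acc (sevN s))]
    rw [foldl_max_sevN _ 0 le_rfl, find?_eq_pickN]
    generalize ws.map (fun wt => PySem.Dict.getD (PySem.Dict.mk wt) "main_diff" "SAME") = mds
    by_cases m1 : "DIVERGED" ∈ mds <;> by_cases m2 : "BEHIND" ∈ mds <;> by_cases m3 : "AHEAD" ∈ mds <;>
      simp [pickN, m1, m2, m3, sevN, PySem.Dict.getD, PySem.Dict.get?]
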